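-- pv_equiv track=rewrite | github.com/asouzaaa/Python | scrabble_score.py | scrabble_score
-- ===== SOURCE A (Python) =====
-- def scrabble_score(palavra):
--     pontuacao = 0
--     tabela_pontuacao = {
--         "a": 1, "e": 1, "i": 1, "o": 1, "u": 1, "l": 1, "n": 1, "r": 1, "s": 1, "t": 1,
--         "d": 2, "g": 2,
--         "b": 3, "c": 3, "m": 3, "p": 3,
--         "f": 4, "h": 4, "v": 4, "w": 4, "y": 4,
--         "k": 5,
--         "j": 8, "x": 8,
--         "q": 10, "z": 10
--     }
--
--     palavra = palavra.lower()  # Converter a palavra para minúsculas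
--     for letra in palavra:
--         if letra.isalpha():
--             pontuacao += tabela_pontuacao[letra]
--
--     return pontuacao
-- ===== SOURCE B (Python) =====
-- def scrabble_score(palavra):
--     # Stage 1: histogram of the alphabetic letters (lowercased).
--     freq = {}
--     for ch in palavra.lower():
--         if ch.isalpha():
--             freq[ch] = freq.get(ch, 0) + 1
--     # Stage 2: weighted sum of the histogram against the scoring table.
--     scores = {ch: pts
--               for pts, letters in ((1, "aeioulnrst"), (2, "dg"), (3, "bcmp"),
--                                    (4, "fhvwy"), (5, "k"), (8, "jx"), (10, "qz"))
--               for ch in letters}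
--     return sum(scores[ch] * n for ch, n in freq.items())
-- ===== Notes on version B (the rewrite author's own statement) =====
-- stated objective: alternative
-- what changed: Replaces A's single pass that adds a dict score per character by a two-stage aggregation: first build a frequency histogram of the alphabetic letters, then compute one weighted sum score*count over the distinct letters of the histogram.
import Mathlib
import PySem

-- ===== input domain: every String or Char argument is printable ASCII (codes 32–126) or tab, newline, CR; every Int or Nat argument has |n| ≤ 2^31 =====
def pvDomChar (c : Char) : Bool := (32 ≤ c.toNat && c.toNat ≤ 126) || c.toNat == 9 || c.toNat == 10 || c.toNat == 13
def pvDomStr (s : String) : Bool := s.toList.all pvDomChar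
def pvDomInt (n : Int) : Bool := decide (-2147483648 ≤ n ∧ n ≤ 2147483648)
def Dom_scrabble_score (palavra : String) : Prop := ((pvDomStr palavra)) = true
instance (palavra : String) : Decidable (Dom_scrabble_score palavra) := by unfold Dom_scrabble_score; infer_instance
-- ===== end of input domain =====

-- B replaces A's per-character add-a-score pass by a two-stage aggregation (letter histogram,
-- then one weighted sum over the distinct letters); same cost, different structure.

-- ===== PORT A =====
-- A's 26-entry letter→points dict (insertion order as written in Python).
def pvTabelaA : PySem.Dict Char Int := PySem.Dict.ofList
  [('a',1),('e',1),('i',1),('o',1),('u',1),('l',1),('n',1),('r',1),('s',1),('t',1),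
   ('d',2),('g',2),
   ('b',3),('c',3),('m',3),('p',3),
   ('f',4),('h',4),('v',4),('w',4),('y',4),
   ('k',5),
   ('j',8),('x',8),
   ('q',10),('z',10)]

-- tabela_pontuacao[letra]: on Dom every lowercased alphabetic char is a-z, so the lookup
-- never raises KeyError; getD 0 is exact there.
def scrabble_score (palavra : String) : Int :=
  (PySem.Str.lower palavra).toList.foldl
    (fun pontuacao letra =>
      if PySem.Chars.isalpha letra then pontuacao + pvTabelaA.getD letra 0 else pontuacao)
    0

-- ===== PORT B =====
-- Source B's dict comprehension: {ch: pts for pts, letters in (…) for ch in letters}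
def pvScoresB : PySem.Dict Char Int :=
  ([(1, "aeioulnrst".toList), (2, "dg".toList), (3, "bcmp".toList),
    (4, "fhvwy".toList), (5, "k".toList), (8, "jx".toList), (10, "qz".toList)] :
      List (Int × List Char)).foldl
    (fun d p => p.2.foldl (fun d ch => d.insert ch p.1) d) PySem.Dict.empty

-- Stage 1: freq histogram of alphabetic lowercased chars; Stage 2: sum(scores[ch] * n for ch, n in freq.items()).
-- scores[ch]: on Dom every key of freq is a-z, so the lookup never raises KeyError; getD 0 is exact there.
def scrabble_score_alt (palavra : String) : Int :=
  let freq := (PySem.Str.lower palavra).toList.foldl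
    (fun d ch => if PySem.Chars.isalpha ch then d.insert ch (d.getD ch 0 + 1) else d)
    PySem.Dict.empty
  (freq.items.map (fun p => pvScoresB.getD p.1 0 * p.2)).sum

-- ===== PRECONDITION & SPEC =====
def Spec_scrabble_score (palavra : String) (out : Int) : Prop := out = scrabble_score_alt palavra
instance (palavra : String) (out : Int) : Decidable (Spec_scrabble_score palavra out) := by unfold Spec_scrabble_score; infer_instance

-- ===== CLAIM (what is proved, stated in full; the proofs are below) =====
def Claim_equal_scrabble_score : Prop := ∀ (palavra : String), Dom_scrabble_score palavra → Spec_scrabble_score palavra (scrabble_score palavra)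

-- ===== LEMMAS AND PROOFS =====

-- A's per-char contribution
def pvDeltaA (c : Char) : Int :=
  if PySem.Chars.isalpha c then pvTabelaA.getD c 0 else 0

lemma pvFoldA (l : List Char) (acc : Int) :
    l.foldl (fun pontuacao letra =>
      if PySem.Chars.isalpha letra then pontuacao + pvTabelaA.getD letra 0 else pontuacao) acc
    = acc + (l.map pvDeltaA).sum := by
  induction l generalizing acc with
  | nil => simp
  | cons c t ih =>
      simp only [List.foldl_cons, List.map_cons, List.sum_cons, ih, pvDeltaA]
      split_ifs <;> ring

-- B's histogram loop is Counter of the alpha-filtered list.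
lemma pvFoldB (l : List Char) (d : PySem.Dict Char Int) :
    l.foldl (fun d ch => if PySem.Chars.isalpha ch then d.insert ch (d.getD ch 0 + 1) else d) d
    = (l.filter PySem.Chars.isalpha).foldl (fun d x => d.insert x (d.getD x 0 + 1)) d := by
  induction l generalizing d with
  | nil => rfl
  | cons c t ih =>
      simp only [List.foldl_cons, List.filter_cons]
      split_ifs with h <;> simp [ih, List.foldl_cons]

-- Σ_{k∈ks} (if k = c then f k else 0) = f c, for nodup ks containing c
lemma pvSumIte (f : Char → Int) (c : Char) (ks : List Char) (hnd : ks.Nodup) (hc : c ∈ ks) :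
    (ks.map (fun k => if k = c then f k else 0)).sum = f c := by
  induction ks with
  | nil => cases hc
  | cons k t ih =>
      rcases List.mem_cons.mp hc with h | h
      · subst h
        have hz : ∀ x ∈ t, (if x = c then f x else 0) = 0 := by
          intro x hx
          have : x ≠ c := fun e => (List.nodup_cons.mp hnd).1 (e ▸ hx)
          simp [this]
        simp [List.map_cons, List.sum_cons, List.map_congr_left hz]
      · have hk : k ≠ c := fun e => (List.nodup_cons.mp hnd).1 (e ▸ h)
        simp [List.map_cons, List.sum_cons, hk, ih (List.nodup_cons.mp hnd).2 h]

-- weighted count sum over distinct keys = plain sum over the list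
lemma pvCountSum (f : Char → Int) (l ks : List Char) (hnd : ks.Nodup)
    (hcov : ∀ c ∈ l, c ∈ ks) :
    (ks.map (fun k => f k * (l.count k : Int))).sum = (l.map f).sum := by
  induction l with
  | nil => simp
  | cons c t ih =>
      have hsplit : ∀ k : Char, f k * ((c :: t).count k : Int)
          = f k * (t.count k : Int) + (if k = c then f k else 0) := by
        intro k
        by_cases h : k = c
        · subst h; simp [mul_add]
        · simp [List.count_cons, h, if_neg (fun e : c = k => h e.symm)]
      calc (ks.map (fun k => f k * ((c :: t).count k : Int))).sum
          = (ks.map (fun k => f k * (t.count k : Int) + (if k = c then f k else 0))).sum := by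
            exact congrArg List.sum (List.map_congr_left (fun k _ => hsplit k))
        _ = (ks.map (fun k => f k * (t.count k : Int))).sum
            + (ks.map (fun k => if k = c then f k else 0)).sum := by
            rw [← List.sum_map_add]
        _ = (t.map f).sum + f c := by
            rw [ih (fun x hx => hcov x (List.mem_cons_of_mem _ hx)),
                pvSumIte f c ks hnd (hcov c List.mem_cons_self)]
        _ = ((c :: t).map f).sum := by simp [add_comm]

set_option maxRecDepth 8192 in
lemma pvScore_eq_of_lt (n : Nat) (h : n < 128) (ha : PySem.Chars.isalpha (Char.ofNat n) = true) :
    pvTabelaA.getD (Char.ofNat n) 0 = pvScoresB.getD (Char.ofNat n) 0 := by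
  revert ha; revert h; revert n; decide

lemma pvLowerChar_lt (n : Nat) (h : n < 128) :
    (PySem.Chars.lowerChar (Char.ofNat n)).toNat < 128 := by
  revert h; revert n; decide

-- chars of the lowered word stay ASCII on Dom
lemma pvLowered_ascii (palavra : String) (hdom : Dom_scrabble_score palavra) :
    ∀ c ∈ (PySem.Str.lower palavra).toList, c.toNat < 128 := by
  intro c hc
  have hlow : (PySem.Str.lower palavra).toList = palavra.toList.map PySem.Chars.lowerChar := by
    simp [PySem.Chars.lower]
  rw [hlow] at hc
  rcases List.mem_map.mp hc with ⟨c0, hc0, rfl⟩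
  have hdc : pvDomChar c0 = true := List.all_eq_true.mp hdom c0 hc0
  have hlt : c0.toNat < 128 := by
    simp only [pvDomChar, Bool.or_eq_true, Bool.and_eq_true, decide_eq_true_eq, beq_iff_eq] at hdc
    omega
  have := pvLowerChar_lt c0.toNat hlt
  rwa [Char.ofNat_toNat] at this

-- Σ over l of A's delta = Σ over the alpha-filtered list of B's score (chars ASCII)
lemma pvFinal (l : List Char) (hascii : ∀ c ∈ l, c.toNat < 128) :
    (l.map pvDeltaA).sum
    = ((l.filter PySem.Chars.isalpha).map (fun c => pvScoresB.getD c 0)).sum := by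
  induction l with
  | nil => rfl
  | cons c t ih =>
      have hc : c.toNat < 128 := hascii c List.mem_cons_self
      have ht := ih (fun x hx => hascii x (List.mem_cons_of_mem _ hx))
      simp only [List.filter_cons, List.map_cons, List.sum_cons, pvDeltaA]
      by_cases ha : PySem.Chars.isalpha c = true
      · have := pvScore_eq_of_lt c.toNat hc (by rwa [Char.ofNat_toNat])
        rw [Char.ofNat_toNat] at this
        simp [ha, ht, this]
      · simp [ha, ht]

-- ===== VERDICT (by name: the statement is the Claim_ definition above) =====
theorem scrabble_score_spec : Claim_equal_scrabble_score := by
  intro palavra hdom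
  unfold Spec_scrabble_score scrabble_score scrabble_score_alt
  set l := (PySem.Str.lower palavra).toList with hl
  rw [pvFoldA, zero_add, pvFoldB, PySem.Dict.foldl_insert_getD_add_one_eq_counter]
  show (l.map pvDeltaA).sum = ((PySem.Dict.counter (l.filter PySem.Chars.isalpha)).items.map
    (fun p => pvScoresB.getD p.1 0 * p.2)).sum
  rw [PySem.Dict.items_counter, List.map_map]
  simp only [Function.comp_def]
  rw [pvCountSum (fun c => pvScoresB.getD c 0) (l.filter PySem.Chars.isalpha) _
        (PySem.Set.nodup_ofList _) (fun c hc => (PySem.Set.mem_ofList _ _).mpr hc)]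
  exact pvFinal l (pvLowered_ascii palavra hdom)
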